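-- pv_equiv track=rewrite | github.com/svenwelink/AdventOfCode | 2023/day07.py | getCardsPower
-- ===== SOURCE A (Python) =====
-- cardValueChar = ["T", "J", "Q", "K", "A"]
--
-- def getCardsPower(hand):
--     cardsPower = 0
--     for i in range(len(hand)):
--         card = hand[i]
--         if card.isnumeric():
--             cardsPower += int(card) * 100 ** (len(hand) - 1 - i)
--         else:
--             cardNumber = int(cardValueChar.index(card) + 10)
--             cardsPower += cardNumber * 100 ** (len(hand) - 1 - i)
--     return(cardsPower)
-- ===== SOURCE B (Python) =====
-- cardValueChar = ["T", "J", "Q", "K", "A"]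
--
-- def getCardsPower(hand):
--     values = [int(c) if c.isnumeric() else cardValueChar.index(c) + 10 for c in hand]
--     power = 0
--     for v in values:
--         power = power * 100 + v
--     return power
-- ===== Notes on version B (the rewrite author's own statement) =====
-- stated objective: simpler
-- what changed: B first maps each card character to its numeric value, then evaluates the base-100 number with a Horner fold (acc = acc*100 + v), instead of summing independent value * 100**(len-1-i) terms with explicit exponentiation over indices.
import Mathlib
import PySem

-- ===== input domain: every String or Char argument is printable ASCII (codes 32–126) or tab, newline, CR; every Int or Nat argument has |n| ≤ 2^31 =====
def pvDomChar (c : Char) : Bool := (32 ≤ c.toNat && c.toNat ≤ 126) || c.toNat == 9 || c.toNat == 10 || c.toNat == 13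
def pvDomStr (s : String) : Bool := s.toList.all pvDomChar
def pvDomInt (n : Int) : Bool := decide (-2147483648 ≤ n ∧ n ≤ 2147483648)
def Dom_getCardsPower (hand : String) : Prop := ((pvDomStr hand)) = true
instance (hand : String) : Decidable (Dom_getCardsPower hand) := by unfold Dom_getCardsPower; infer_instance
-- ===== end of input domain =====

-- B changes the evaluation scheme: map cards to values, then one Horner fold instead of per-index exponentiation (objective: simpler).

-- ===== PORT A =====
-- module constant cardValueChar = ["T", "J", "Q", "K", "A"]
def cardValueChar : List Char := ['T', 'J', 'Q', 'K', 'A']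

-- literal transliteration of A: loop over i in range(len(hand)), add value * 100 ** (len-1-i).
-- card.isnumeric() is ported as PySem.Chars.isdigit, exact on the printable-ASCII domain Dom_;
-- int(card) is PySem.Int.ofChars? [card] (its .getD 0 / index?'s .getD 0 are never the raising
-- 'none' branch under Pre_, which excludes the ValueError inputs).
def getCardsPower (hand : String) : Int :=
  let cs := hand.toList
  let n : Int := cs.length
  (PySem.List.pyRange 0 n 1).foldl
    (fun cardsPower i =>
      let card := PySem.List.pyGetD cs i ' '
      if PySem.Chars.isdigit card then
        cardsPower + (PySem.Int.ofChars? [card]).getD 0 * 100 ^ (n - 1 - i).toNat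
      else
        cardsPower + (((PySem.List.index? cardValueChar card).getD 0 : Int) + 10) * 100 ^ (n - 1 - i).toNat)
    0

-- ===== PORT B =====
-- literal transliteration of B: map each character to its value, then a Horner fold.
def getCardsPower_alt (hand : String) : Int :=
  let values := hand.toList.map (fun c =>
    if PySem.Chars.isdigit c then (PySem.Int.ofChars? [c]).getD 0
    else ((PySem.List.index? cardValueChar c).getD 0 : Int) + 10)
  values.foldl (fun power v => power * 100 + v) 0

-- ===== PRECONDITION & SPEC =====
-- Pre_ excludes exactly the inputs where A raises ValueError: a character that is neither a
-- digit nor one of T/J/Q/K/A (cardValueChar.index fails; B raises there too).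
def Pre_getCardsPower (hand : String) : Prop :=
  (hand.toList.all (fun c => PySem.Chars.isdigit c || cardValueChar.contains c)) = true
instance (hand : String) : Decidable (Pre_getCardsPower hand) := by unfold Pre_getCardsPower; infer_instance
def pvWitness_getCardsPower : String := "32T3K"

def Spec_getCardsPower (hand : String) (out : Int) : Prop := out = getCardsPower_alt hand
instance (hand : String) (out : Int) : Decidable (Spec_getCardsPower hand out) := by unfold Spec_getCardsPower; infer_instance

-- ===== CLAIM (what is proved, stated in full; the proofs are below) =====
def Claim_equal_getCardsPower : Prop := ∀ (hand : String), Dom_getCardsPower hand → Pre_getCardsPower hand → Spec_getCardsPower hand (getCardsPower hand)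

-- ===== LEMMAS AND PROOFS =====

-- the per-card value both programs compute
def cardVal (c : Char) : Int :=
  if PySem.Chars.isdigit c then (PySem.Int.ofChars? [c]).getD 0
  else ((PySem.List.index? cardValueChar c).getD 0 : Int) + 10

-- A's positional sum over range(len cs), with an exponent offset e, equals the Horner fold times 100^e.
theorem rangeKey (cs : List Char) : ∀ (e : Nat) (acc : Int),
    (List.range cs.length).foldl
      (fun a k => a + cardVal (cs.getD k ' ') * 100 ^ (cs.length - 1 - k + e)) acc
    = acc + cs.foldl (fun a c => a * 100 + cardVal c) 0 * 100 ^ e := by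
  induction cs using List.reverseRecOn with
  | nil => intro e acc; simp
  | append_singleton cs' c ih =>
    intro e acc
    have hlen : (cs' ++ [c]).length = cs'.length + 1 := by simp
    rw [hlen, List.range_succ, List.foldl_append]
    have hcong :
        (List.range cs'.length).foldl
          (fun a k => a + cardVal ((cs' ++ [c]).getD k ' ') * 100 ^ (cs'.length + 1 - 1 - k + e)) acc
        = (List.range cs'.length).foldl
          (fun a k => a + cardVal (cs'.getD k ' ') * 100 ^ (cs'.length - 1 - k + (e + 1))) acc := by
      apply PySem.List.foldl_congr_mem
      intro a k hk
      have hk' : k < cs'.length := List.mem_range.mp hk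
      have h1 : (cs' ++ [c]).getD k ' ' = cs'.getD k ' ' := by
        simp [List.getD, List.getElem?_append_left hk']
      have h2 : cs'.length + 1 - 1 - k + e = cs'.length - 1 - k + (e + 1) := by omega
      rw [h1, h2]
    rw [hcong, ih (e + 1)]
    simp only [List.foldl_append, List.foldl_cons, List.foldl_nil]
    have h3 : cs'.length + 1 - 1 - cs'.length + e = e := by omega
    have h4 : (cs' ++ [c]).getD cs'.length ' ' = c := by
      simp [List.getD]
    rw [h3, h4]
    ring

-- ===== VERDICT (by name: the statement is the Claim_ definition above) =====
theorem getCardsPower_spec : Claim_equal_getCardsPower := by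
  intro hand _ _
  unfold Spec_getCardsPower getCardsPower getCardsPower_alt
  simp only [PySem.List.pyRange_one, List.foldl_map, zero_add, sub_zero]
  have htn : ((hand.toList.length : Int)).toNat = hand.toList.length := Int.toNat_natCast _
  rw [htn]
  have hstep :
      (List.range hand.toList.length).foldl
        (fun a k => a + cardVal (hand.toList.getD k ' ') * 100 ^ (hand.toList.length - 1 - k + 0)) 0
      = 0 + hand.toList.foldl (fun a c => a * 100 + cardVal c) 0 * 100 ^ 0 :=
    rangeKey hand.toList 0 0
  simp only [pow_zero, mul_one, zero_add, Nat.add_zero] at hstep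
  refine Eq.trans ?_ (Eq.trans hstep ?_)
  · apply PySem.List.foldl_congr_mem
    intro a k hk
    have hget : PySem.List.pyGetD hand.toList (k : Int) ' ' = hand.toList.getD k ' ' :=
      PySem.List.pyGetD_natCast _ _ _
    have hexp : ((hand.toList.length : Int) - 1 - (k : Int)).toNat = hand.toList.length - 1 - k := by
      omega
    rw [hget, hexp]
    simp only [cardVal]
    split_ifs <;> ring
  · apply PySem.List.foldl_congr_mem
    intro a c _
    simp only [cardVal]
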